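-- pv_equiv track=rewrite | github.com/sathu0622/25-26J-438-AI-Powered-LMS-for-Visually-Impaired-Students | backend/braille_decoder.py | group_into_cells
-- ===== SOURCE A (Python) =====
-- def group_into_cells(line):
--     """Group line dots into Braille cells using X-coordinate"""
--     if not line:
--         return []
--
--     line = sorted(line, key=lambda p: p[0])
--     cells = []
--     current_cell = []
--     last_x = line[0][0]
--
--     for dot in line:
--         if dot[0] - last_x > 18:  # horizontal gap threshold
--             cells.append(current_cell)
--             current_cell = []
--         current_cell.append(dot)
--         last_x = dot[0]
--
--     if current_cell:
--         cells.append(current_cell)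
--
--     return cells
-- ===== SOURCE B (Python) =====
-- def group_into_cells(line):
--     """Group line dots into Braille cells using X-coordinate"""
--     s = sorted(line, key=lambda p: p[0])
--     if not s:
--         return []
--     bounds = [i for i, (prev, cur) in enumerate(zip(s, s[1:]), 1)
--               if cur[0] - prev[0] > 18]
--     return [s[a:b] for a, b in zip([0] + bounds, bounds + [len(s)])]
-- ===== Notes on version B (the rewrite author's own statement) =====
-- stated objective: alternative
-- what changed: A's single accumulate-current-cell loop with mutable (cells, current_cell, last_x) state is replaced by a staged 'find cut points, then partition' pipeline: one pass over adjacent pairs collects the boundary indices, and the result is built by slicing the sorted list between consecutive boundaries.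
import Mathlib
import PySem

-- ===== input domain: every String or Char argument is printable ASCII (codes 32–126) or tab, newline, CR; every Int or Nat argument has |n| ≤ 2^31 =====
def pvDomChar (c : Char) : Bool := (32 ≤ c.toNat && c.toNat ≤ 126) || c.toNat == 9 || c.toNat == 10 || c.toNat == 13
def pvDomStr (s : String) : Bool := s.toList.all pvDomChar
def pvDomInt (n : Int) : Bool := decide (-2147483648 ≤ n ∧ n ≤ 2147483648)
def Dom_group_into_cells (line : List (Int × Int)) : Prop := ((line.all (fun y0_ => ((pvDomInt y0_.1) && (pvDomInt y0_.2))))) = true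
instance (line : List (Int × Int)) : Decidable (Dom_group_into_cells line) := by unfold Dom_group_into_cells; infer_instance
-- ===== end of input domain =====

-- B replaces A's single accumulate-current-cell loop by a staged pipeline: sort, collect the
-- boundary indices (adjacent x-gap > 18) in one pass over consecutive pairs, then build the
-- result by slicing between consecutive boundaries (objective: alternative, same cost).

-- ===== PORT A =====
-- the loop body of A (cells, current_cell, last_x as the fold state)
def pvStepA (st : List (List (Int × Int)) × List (Int × Int) × Int) (dot : Int × Int) :
    List (List (Int × Int)) × List (Int × Int) × Int :=
  if dot.1 - st.2.2 > 18 then (st.1 ++ [st.2.1], [dot], dot.1)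
  else (st.1, st.2.1 ++ [dot], dot.1)

def group_into_cells (line : List (Int × Int)) : List (List (Int × Int)) :=
  if line = [] then []
  else
    let s := PySem.List.sorted line (fun p => p.1) false
    match s with
    | [] => []  -- unreachable: sorted keeps the length, and line ≠ []
    | x :: _ =>
      let st := s.foldl pvStepA ([], [], x.1)   -- last_x = line[0][0]
      if st.2.1 ≠ [] then st.1 ++ [st.2.1] else st.1

-- ===== PORT B =====
def group_into_cells_alt (line : List (Int × Int)) : List (List (Int × Int)) :=
  let s := PySem.List.sorted line (fun p => p.1) false
  if s = [] then []
  else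
    -- bounds = [i for i, (prev, cur) in enumerate(zip(s, s[1:]), 1) if cur[0] - prev[0] > 18]
    let bounds : List Int :=
      ((PySem.List.enumerate (s.zip s.tail) 1).filter
        (fun ip => decide (ip.2.2.1 - ip.2.1.1 > 18))).map (fun ip => ip.1)
    -- [s[a:b] for a, b in zip([0] + bounds, bounds + [len(s)])]
    ((0 :: bounds).zip (bounds ++ [PySem.List.len s])).map
      (fun ab => PySem.List.slice s (some ab.1) (some ab.2))

-- ===== PRECONDITION & SPEC =====
def Spec_group_into_cells (line : List (Int × Int)) (out : List (List (Int × Int))) : Prop := out = group_into_cells_alt line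
instance (line : List (Int × Int)) (out : List (List (Int × Int))) : Decidable (Spec_group_into_cells line out) := by unfold Spec_group_into_cells; infer_instance

-- ===== CLAIM (what is proved, stated in full; the proofs are below) =====
def Claim_equal_group_into_cells : Prop := ∀ (line : List (Int × Int)), Dom_group_into_cells line → Spec_group_into_cells line (group_into_cells line)

-- ===== LEMMAS AND PROOFS =====

-- a common characterisation both ports are reduced to: split at adjacent gaps > 18
def pvChunks : List (Int × Int) → List (List (Int × Int))
  | [] => []
  | x :: xs =>
    match xs with
    | y :: _ =>
      if y.1 - x.1 ≤ 18 then
        match pvChunks xs with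
        | r0 :: rtail => (x :: r0) :: rtail
        | [] => [[x]]
      else [x] :: pvChunks xs
    | [] => [x] :: pvChunks xs

theorem pvChunks_cons2 (x y : Int × Int) (t : List (Int × Int)) :
    pvChunks (x :: y :: t) =
      if y.1 - x.1 ≤ 18 then
        (match pvChunks (y :: t) with
         | r0 :: rtail => (x :: r0) :: rtail
         | [] => [[x]])
      else [x] :: pvChunks (y :: t) := rfl

-- ===== A reduces to pvChunks =====

-- the remaining run of A's loop, as a function of (current_cell, last_x, remaining dots)
def pvGlue (cur : List (Int × Int)) (last : Int) : List (Int × Int) → List (List (Int × Int))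
  | [] => [cur]
  | d :: t => if d.1 - last > 18 then cur :: pvGlue [d] d.1 t else pvGlue (cur ++ [d]) d.1 t

theorem pvGlue_cons (cur : List (Int × Int)) (last : Int) (d : Int × Int) (t : List (Int × Int)) :
    pvGlue cur last (d :: t) =
      if d.1 - last > 18 then cur :: pvGlue [d] d.1 t else pvGlue (cur ++ [d]) d.1 t := rfl

theorem pvGlue_foldl (s : List (Int × Int)) :
    ∀ (cells : List (List (Int × Int))) (cur : List (Int × Int)) (last : Int), cur ≠ [] →
      (let st := s.foldl pvStepA (cells, cur, last);
       if st.2.1 ≠ [] then st.1 ++ [st.2.1] else st.1) = cells ++ pvGlue cur last s := by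
  induction s with
  | nil => intro cells cur last h; simp [pvGlue, h]
  | cons d t ih =>
    intro cells cur last h
    simp only [List.foldl_cons, pvStepA, pvGlue]
    by_cases hg : d.1 - last > 18
    · simp only [hg, if_pos]
      have := ih (cells ++ [cur]) [d] d.1 (by simp)
      simp only [this]
      simp
    · simp only [hg, if_false]
      have := ih cells (cur ++ [d]) d.1 (by simp)
      simpa using this

theorem pvGlue_chunks (t : List (Int × Int)) :
    ∀ (y : Int × Int) (cur : List (Int × Int)) (last : Int),
      (y.1 - last > 18 → pvGlue cur last (y :: t) = cur :: pvChunks (y :: t)) ∧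
      (¬ y.1 - last > 18 → ∃ c cs, pvChunks (y :: t) = c :: cs ∧
          pvGlue cur last (y :: t) = (cur ++ c) :: cs) := by
  induction t with
  | nil =>
    intro y cur last
    constructor
    · intro hg; simp [pvGlue, pvChunks, hg]
    · intro hg; exact ⟨[y], [], by simp [pvChunks], by simp [pvGlue, hg]⟩
  | cons z t' ih =>
    intro y cur last
    have ih1 := fun cur' => ih z cur' y.1
    by_cases hz : z.1 - y.1 > 18
    · have hch : pvChunks (y :: z :: t') = [y] :: pvChunks (z :: t') := by
        rw [pvChunks_cons2, if_neg (by omega)]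
      constructor
      · intro hg
        rw [pvGlue_cons, if_pos hg, (ih1 [y]).1 hz, hch]
      · intro hg
        refine ⟨[y], pvChunks (z :: t'), hch, ?_⟩
        rw [pvGlue_cons, if_neg hg, (ih1 (cur ++ [y])).1 hz]
    · obtain ⟨c, cs, hc, _⟩ := (ih1 [y]).2 hz
      have hch : pvChunks (y :: z :: t') = (y :: c) :: cs := by
        rw [pvChunks_cons2, if_pos (by omega : z.1 - y.1 ≤ 18), hc]
      constructor
      · intro hg
        obtain ⟨c', cs', hc', hgl'⟩ := (ih1 [y]).2 hz
        rw [hc] at hc'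
        obtain ⟨h1, h2⟩ : c' = c ∧ cs' = cs :=
          ⟨(List.cons.injEq _ _ _ _ ▸ hc'.symm).1, (List.cons.injEq _ _ _ _ ▸ hc'.symm).2⟩
        rw [pvGlue_cons, if_pos hg, hgl', h1, h2, hch]
        simp
      · intro hg
        obtain ⟨c', cs', hc', hgl'⟩ := (ih1 (cur ++ [y])).2 hz
        rw [hc] at hc'
        obtain ⟨h1, h2⟩ : c' = c ∧ cs' = cs :=
          ⟨(List.cons.injEq _ _ _ _ ▸ hc'.symm).1, (List.cons.injEq _ _ _ _ ▸ hc'.symm).2⟩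
        refine ⟨y :: c, cs, hch, ?_⟩
        rw [pvGlue_cons, if_neg hg, hgl', h1, h2]
        simp

theorem pvGlue_head (s : List (Int × Int)) (x : Int × Int) :
    pvGlue [x] x.1 s = pvChunks (x :: s) := by
  cases s with
  | nil => simp [pvGlue, pvChunks]
  | cons y t =>
    by_cases hg : y.1 - x.1 > 18
    · rw [(pvGlue_chunks t y [x] x.1).1 hg, pvChunks_cons2, if_neg (by omega)]
    · obtain ⟨c, cs, hc, hgl⟩ := (pvGlue_chunks t y [x] x.1).2 hg
      rw [hgl, pvChunks_cons2, if_pos (by omega : y.1 - x.1 ≤ 18), hc]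
      simp

-- ===== B reduces to pvChunks =====

-- 0-based positions of the adjacent pairs with gap > 18
def pvGaps : List ((Int × Int) × (Int × Int)) → List Nat
  | [] => []
  | q :: t => if q.2.1 - q.1.1 > 18 then 0 :: (pvGaps t).map (· + 1)
              else (pvGaps t).map (· + 1)

-- the boundary indices of s (1-based)
def pvCuts (s : List (Int × Int)) : List Nat := (pvGaps (s.zip s.tail)).map (· + 1)

-- consecutive pairs of 0 :: B ++ [e]
def pvPairs : Nat → List Nat → Nat → List (Nat × Nat)
  | a, [], e => [(a, e)]
  | a, b :: t, e => (a, b) :: pvPairs b t e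

def pvParts (s : List (Int × Int)) (L : List (Nat × Nat)) : List (List (Int × Int)) :=
  L.map (fun ab => (s.drop ab.1).take (ab.2 - ab.1))

theorem pvParts_cons (s : List (Int × Int)) (ab : Nat × Nat) (L : List (Nat × Nat)) :
    pvParts s (ab :: L) = (s.drop ab.1).take (ab.2 - ab.1) :: pvParts s L := rfl

theorem pvEnum_filter (ps : List ((Int × Int) × (Int × Int))) :
    ∀ (k : Int),
      ((PySem.List.enumerate ps k).filter
        (fun ip => decide (ip.2.2.1 - ip.2.1.1 > 18))).map (fun ip => ip.1)
      = (pvGaps ps).map (fun n : Nat => k + n) := by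
  induction ps with
  | nil => intro k; simp [PySem.List.enumerate_nil, pvGaps]
  | cons q t ih =>
    intro k
    rw [PySem.List.enumerate_cons, List.filter_cons]
    by_cases hg : q.2.1 - q.1.1 > 18
    · rw [if_pos (by simpa using hg)]
      rw [List.map_cons, ih (k + 1)]
      simp only [pvGaps, if_pos hg, List.map_cons, List.map_map]
      refine List.cons_eq_cons.mpr ⟨by simp, List.map_congr_left fun n _ => ?_⟩
      simp only [Function.comp_apply]
      push_cast; ring
    · rw [if_neg (by simpa using hg)]
      rw [ih (k + 1)]
      simp only [pvGaps, if_neg hg, List.map_map]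
      refine List.map_congr_left fun n _ => ?_
      simp only [Function.comp_apply]
      push_cast; ring

theorem pvCuts_cons2 (x y : Int × Int) (t : List (Int × Int)) :
    pvCuts (x :: y :: t) =
      if y.1 - x.1 > 18 then 1 :: (pvCuts (y :: t)).map (· + 1)
      else (pvCuts (y :: t)).map (· + 1) := by
  simp only [pvCuts, List.zip_cons_cons, List.tail_cons, pvGaps]
  split <;> simp [List.map_map]

theorem pvPairs_shift (B : List Nat) :
    ∀ (a e : Nat), pvPairs (a + 1) (B.map (· + 1)) (e + 1)
      = (pvPairs a B e).map (fun ab => (ab.1 + 1, ab.2 + 1)) := by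
  induction B with
  | nil => intro a e; simp [pvPairs]
  | cons b t ih => intro a e; simp [pvPairs, ih b e]

theorem pvParts_shift (x : Int × Int) (s : List (Int × Int)) (L : List (Nat × Nat)) :
    pvParts (x :: s) (L.map (fun ab => (ab.1 + 1, ab.2 + 1))) = pvParts s L := by
  simp only [pvParts, List.map_map]
  exact List.map_congr_left fun ab _ => by
    simp only [Function.comp, List.drop_succ_cons]
    congr 1
    omega

theorem pvParts_chunks (s : List (Int × Int)) (hs : s ≠ []) :
    pvParts s (pvPairs 0 (pvCuts s) s.length) = pvChunks s := by
  induction s with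
  | nil => exact absurd rfl hs
  | cons x xs ih =>
    cases xs with
    | nil => rfl
    | cons y t =>
      have ihc := ih (by simp)
      have hlen : (x :: y :: t).length = (y :: t).length + 1 := rfl
      rw [pvCuts_cons2, hlen]
      by_cases hg : y.1 - x.1 > 18
      · rw [if_pos hg, pvChunks_cons2, if_neg (by omega)]
        rw [show pvPairs 0 (1 :: (pvCuts (y :: t)).map (· + 1)) ((y :: t).length + 1)
              = (0, 1) :: (pvPairs 0 (pvCuts (y :: t)) (y :: t).length).map
                  (fun ab => (ab.1 + 1, ab.2 + 1)) from by
            rw [pvPairs, pvPairs_shift]]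
        rw [pvParts_cons, pvParts_shift, ihc]
        simp
      · rw [if_neg hg, pvChunks_cons2, if_pos (by omega : y.1 - x.1 ≤ 18)]
        cases hC : pvCuts (y :: t) with
        | nil =>
          rw [hC] at ihc
          have h2 : pvChunks (y :: t) = [y :: t] := by
            rw [← ihc]
            simp [pvParts, pvPairs]
          rw [h2, List.map_nil]
          show pvParts (x :: y :: t) [(0, (y :: t).length + 1)] = [x :: y :: t]
          rw [pvParts_cons]
          rw [show pvParts (x :: y :: t) [] = [] from rfl]
          rw [Nat.sub_zero, List.drop_zero, ← hlen, List.take_length]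
        | cons c0 T =>
          rw [hC] at ihc
          have hch : pvChunks (y :: t)
              = (y :: t).take c0 :: pvParts (y :: t) (pvPairs c0 T (y :: t).length) := by
            rw [← ihc]
            rw [show pvPairs 0 (c0 :: T) (y :: t).length = (0, c0) :: pvPairs c0 T (y :: t).length
              from rfl]
            rw [pvParts_cons]
            simp
          rw [hch]
          show pvParts (x :: y :: t)
              (pvPairs 0 ((c0 :: T).map (· + 1)) ((y :: t).length + 1))
            = (x :: (y :: t).take c0) :: pvParts (y :: t) (pvPairs c0 T (y :: t).length)
          rw [List.map_cons]
          rw [show pvPairs 0 ((c0 + 1) :: T.map (· + 1)) ((y :: t).length + 1)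
                = (0, c0 + 1) :: pvPairs (c0 + 1) (T.map (· + 1)) ((y :: t).length + 1) from rfl]
          rw [pvPairs_shift, pvParts_cons, pvParts_shift]
          simp [List.take_succ_cons]

theorem pvZip_cast (B : List Nat) :
    ∀ (a e : Nat),
      (((a : Nat) : Int) :: B.map (Nat.cast)).zip (B.map (Nat.cast) ++ [((e : Nat) : Int)])
        = (pvPairs a B e).map (fun ab => ((ab.1 : Int), (ab.2 : Int))) := by
  induction B with
  | nil => intro a e; simp [pvPairs]
  | cons b t ih => intro a e; simp [pvPairs, ih b e]

theorem pvSlices_parts (s : List (Int × Int)) (L : List (Nat × Nat)) :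
    ((L.map (fun ab => ((ab.1 : Int), (ab.2 : Int)))).map
        (fun ab => PySem.List.slice s (some ab.1) (some ab.2))) = pvParts s L := by
  simp only [List.map_map, pvParts]
  exact List.map_congr_left fun ab _ => by
    simp [Function.comp, PySem.List.slice_natCast]

theorem pvAlt_eq_chunks (line : List (Int × Int)) :
    group_into_cells_alt line = pvChunks (PySem.List.sorted line (fun p => p.1) false) := by
  unfold group_into_cells_alt
  by_cases hs : PySem.List.sorted line (fun p => p.1) false = []
  · rw [if_pos hs, hs]; rfl
  · rw [if_neg hs]
    set s := PySem.List.sorted line (fun p => p.1) false with hsdef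
    have hb : ((PySem.List.enumerate (s.zip s.tail) 1).filter
          (fun ip => decide (ip.2.2.1 - ip.2.1.1 > 18))).map (fun ip => ip.1)
        = (pvCuts s).map (Nat.cast) := by
      rw [pvEnum_filter (s.zip s.tail) 1]
      simp only [pvCuts, List.map_map]
      refine List.map_congr_left fun n _ => ?_
      simp only [Function.comp_apply]
      push_cast; ring
    have hlen : PySem.List.len s = ((s.length : Nat) : Int) := by
      simp [PySem.List.len_eq]
    show ((0 :: ((PySem.List.enumerate (s.zip s.tail) 1).filter
          (fun ip => decide (ip.2.2.1 - ip.2.1.1 > 18))).map (fun ip => ip.1)).zip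
        (((PySem.List.enumerate (s.zip s.tail) 1).filter
          (fun ip => decide (ip.2.2.1 - ip.2.1.1 > 18))).map (fun ip => ip.1)
          ++ [PySem.List.len s])).map
        (fun ab => PySem.List.slice s (some ab.1) (some ab.2)) = pvChunks s
    rw [hb, hlen]
    rw [show ((0 : Int) :: (pvCuts s).map Nat.cast)
          = ((((0 : Nat)) : Int) :: (pvCuts s).map Nat.cast) from by norm_num]
    rw [pvZip_cast (pvCuts s) 0 s.length, pvSlices_parts, pvParts_chunks s hs]

-- ===== VERDICT (by name: the statement is the Claim_ definition above) =====
theorem group_into_cells_spec : Claim_equal_group_into_cells := by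
  intro line _
  unfold Spec_group_into_cells
  rw [pvAlt_eq_chunks]
  unfold group_into_cells
  by_cases hl : line = []
  · subst hl
    simp [PySem.List.sorted, pvChunks]
  · rw [if_neg hl]
    have hlen : (PySem.List.sorted line (fun p => p.1) false).length = line.length :=
      PySem.List.length_sorted ..
    cases hs : PySem.List.sorted line (fun p => p.1) false with
    | nil =>
      exfalso; rw [hs] at hlen; exact hl (List.eq_nil_of_length_eq_zero hlen.symm)
    | cons x rest =>
      simp only
      have hfirst : pvStepA ([], [], x.1) x = ([], [x], x.1) := by
        simp [pvStepA]
      rw [List.foldl_cons, hfirst]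
      have := pvGlue_foldl rest [] [x] x.1 (by simp)
      simp only at this
      rw [this, pvGlue_head]
      simp
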